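-- pv_equiv track=rewrite | github.com/wuxiyang1996/Video_Skills | env_wrappers/sokoban_nl_wrapper.py | _total_min_manhattan
-- ===== SOURCE A (Python) =====
-- from typing import Any, Callable, Dict, List, Optional, Set, Tuple, Union
--
-- def _total_min_manhattan(grid: List[List[str]]) -> Optional[int]:
--     """Sum of each unsolved box's Manhattan distance to its nearest empty target.
--
--     Returns None if the grid has no unsolved boxes or no empty targets.
--     """
--     boxes: List[Tuple[int, int]] = []
--     targets: List[Tuple[int, int]] = []
--     for r, row in enumerate(grid):
--         for c, ch in enumerate(row):
--             if ch == "$":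
--                 boxes.append((r, c))
--             elif ch == "?":
--                 targets.append((r, c))
--     if not boxes or not targets:
--         return None
--     return sum(
--         min(abs(br - tr) + abs(bc - tc) for tr, tc in targets)
--         for br, bc in boxes
--     )
-- ===== SOURCE B (Python) =====
-- def _total_min_manhattan(grid):
--     """Sum of each unsolved box's Manhattan distance to its nearest empty target.
--
--     Returns None if the grid has no unsolved boxes or no empty targets.
--     """
--     cells = [(r, c, ch) for r, row in enumerate(grid) for c, ch in enumerate(row)]
--     boxes = [(r, c) for (r, c, ch) in cells if ch == "$"]
--     targets = [(r, c) for (r, c, ch) in cells if ch == "?"]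
--     if not boxes or not targets:
--         return None
--     # target-major: sweep the targets once, keeping each box's best distance so far
--     best = [None] * len(boxes)
--     for tr, tc in targets:
--         new = []
--         for cur, (br, bc) in zip(best, boxes):
--             d = abs(br - tr) + abs(bc - tc)
--             new.append(d if cur is None or d < cur else cur)
--         best = new
--     return sum(best)
-- ===== Notes on version B (the rewrite author's own statement) =====
-- stated objective: alternative
-- what changed: B collects cells with comprehensions and computes the minima target-major (one sweep over the targets updating a per-box running-best array) instead of A's box-major nested generator min; same exact result by commutativity of min.
import Mathlib
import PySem

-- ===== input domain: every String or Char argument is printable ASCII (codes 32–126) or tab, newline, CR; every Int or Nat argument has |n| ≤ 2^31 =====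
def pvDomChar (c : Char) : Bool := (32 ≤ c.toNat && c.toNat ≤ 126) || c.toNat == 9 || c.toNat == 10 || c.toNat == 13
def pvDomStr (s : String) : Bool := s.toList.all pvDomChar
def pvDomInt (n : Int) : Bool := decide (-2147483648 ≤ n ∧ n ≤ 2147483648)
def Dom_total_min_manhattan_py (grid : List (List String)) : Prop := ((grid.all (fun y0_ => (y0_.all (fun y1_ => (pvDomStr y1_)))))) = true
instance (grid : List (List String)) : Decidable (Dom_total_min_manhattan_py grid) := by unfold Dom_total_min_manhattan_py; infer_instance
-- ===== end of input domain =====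

-- B replaces A's box-major nested generator min by a target-major sweep keeping a per-box
-- running-best array (alternative decomposition, same exact result).

-- ===== PORT A =====
def total_min_manhattan_py (grid : List (List String)) : Option Int :=
  -- the nested enumerate loop appending to boxes / targets
  let st := (PySem.List.enumerate grid 0).foldl
    (fun (st : List (Int × Int) × List (Int × Int)) rrow =>
      (PySem.List.enumerate rrow.2 0).foldl
        (fun st cch =>
          if cch.2 == "$" then (st.1 ++ [(rrow.1, cch.1)], st.2)
          else if cch.2 == "?" then (st.1, st.2 ++ [(rrow.1, cch.1)])
          else st) st)
    (([], []) : List (Int × Int) × List (Int × Int))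
  if st.1 = [] ∨ st.2 = [] then none
  else
    -- min(...) over the targets; it is `some …` here since st.2 ≠ [], so getD 0 is exact
    some (st.1.foldl
      (fun acc b =>
        acc + (PySem.List.min? (st.2.map (fun t => |b.1 - t.1| + |b.2 - t.2|)) (fun y => y)).getD 0)
      0)

-- ===== PORT B =====
-- Source B's conditional update of one best entry by one target distance
def pvUpd (cur : Option Int) (d : Int) : Option Int :=
  match cur with
  | none => some d
  | some v => if d < v then some d else some v

def total_min_manhattan_py_alt (grid : List (List String)) : Option Int :=
  let cells := (PySem.List.enumerate grid 0).flatMap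
    (fun p => (PySem.List.enumerate p.2 0).map (fun q => (p.1, q.1, q.2)))
  let boxes := (cells.filter (fun x => x.2.2 == "$")).map (fun x => (x.1, x.2.1))
  let targets := (cells.filter (fun x => x.2.2 == "?")).map (fun x => (x.1, x.2.1))
  if boxes = [] ∨ targets = [] then none
  else
    let best := targets.foldl
      (fun best t => (best.zip boxes).map
        (fun p => pvUpd p.1 (|p.2.1 - t.1| + |p.2.2 - t.2|)))
      (boxes.map (fun _ => (none : Option Int)))
    -- every entry of best is `some …` here since targets ≠ [], so getD 0 is exact
    some (best.foldl (fun acc o => acc + o.getD 0) 0)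

-- ===== PRECONDITION & SPEC =====
def Spec_total_min_manhattan_py (grid : List (List String)) (out : Option Int) : Prop := out = total_min_manhattan_py_alt grid
instance (grid : List (List String)) (out : Option Int) : Decidable (Spec_total_min_manhattan_py grid out) := by unfold Spec_total_min_manhattan_py; infer_instance

-- ===== CLAIM (what is proved, stated in full; the proofs are below) =====
def Claim_equal_total_min_manhattan_py : Prop := ∀ (grid : List (List String)), Dom_total_min_manhattan_py grid → Spec_total_min_manhattan_py grid (total_min_manhattan_py grid)

-- ===== LEMMAS AND PROOFS =====

-- the Manhattan distance used on both sides
def pvD (b t : Int × Int) : Int := |b.1 - t.1| + |b.2 - t.2|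

-- A's inner row loop, as appended filters
theorem pvInnerA (l : List (Int × String)) (r : Int)
    (st : List (Int × Int) × List (Int × Int)) :
    l.foldl (fun st cch =>
        if cch.2 == "$" then (st.1 ++ [(r, cch.1)], st.2)
        else if cch.2 == "?" then (st.1, st.2 ++ [(r, cch.1)])
        else st) st
    = (st.1 ++ (l.filter (fun q => q.2 == "$")).map (fun q => (r, q.1)),
       st.2 ++ (l.filter (fun q => q.2 == "?")).map (fun q => (r, q.1))) := by
  induction l generalizing st with
  | nil => simp
  | cons q l ih =>
    simp only [List.foldl_cons, ih, List.filter_cons]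
    by_cases h1 : q.2 = "$"
    · simp [h1]
    · by_cases h2 : q.2 = "?"
      · simp [h2]
      · simp [h1, h2]

-- A's outer loop, as appended flatMaps
theorem pvOuterA (g : List (Int × List String))
    (st : List (Int × Int) × List (Int × Int)) :
    g.foldl (fun st rrow =>
        (PySem.List.enumerate rrow.2 0).foldl
          (fun st cch =>
            if cch.2 == "$" then (st.1 ++ [(rrow.1, cch.1)], st.2)
            else if cch.2 == "?" then (st.1, st.2 ++ [(rrow.1, cch.1)])
            else st) st) st
    = (st.1 ++ g.flatMap (fun p =>
         ((PySem.List.enumerate p.2 0).filter (fun q => q.2 == "$")).map (fun q => (p.1, q.1))),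
       st.2 ++ g.flatMap (fun p =>
         ((PySem.List.enumerate p.2 0).filter (fun q => q.2 == "?")).map (fun q => (p.1, q.1)))) := by
  induction g generalizing st with
  | nil => simp
  | cons p g ih =>
    simp only [List.foldl_cons]
    rw [pvInnerA, ih]
    simp [List.append_assoc]

-- B's comprehension pipeline produces the same coordinate lists
theorem pvCellsFilter (g : List (Int × List String)) (s : String) :
    ((g.flatMap (fun p => (PySem.List.enumerate p.2 0).map (fun q => (p.1, q.1, q.2)))).filter
        (fun x => x.2.2 == s)).map (fun x => (x.1, x.2.1))
    = g.flatMap (fun p =>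
        ((PySem.List.enumerate p.2 0).filter (fun q => q.2 == s)).map (fun q => (p.1, q.1))) := by
  induction g with
  | nil => simp
  | cons p g ih =>
    simp only [List.flatMap_cons, List.filter_append, List.map_append, ih,
      List.filter_map, List.map_map]
    rfl

-- the Manhattan distance used on both sides
theorem pvD_def (b t : Int × Int) : pvD b t = |b.1 - t.1| + |b.2 - t.2| := rfl

-- one target step on a best array that is a map over boxes
theorem pvMapStep (boxes : List (Int × Int)) (acc : Int × Int → Option Int) (t : Int × Int) :
    ((boxes.map acc).zip boxes).map (fun p => pvUpd p.1 (pvD p.2 t))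
    = boxes.map (fun b => pvUpd (acc b) (pvD b t)) := by
  induction boxes with
  | nil => rfl
  | cons b bs ih => simp [ih]

-- the whole target sweep, pointwise per box
theorem pvFoldTargets (ts : List (Int × Int)) (boxes : List (Int × Int))
    (acc : Int × Int → Option Int) :
    ts.foldl (fun best t => (best.zip boxes).map
        (fun p => pvUpd p.1 (pvD p.2 t))) (boxes.map acc)
    = boxes.map (fun b => ts.foldl (fun o t => pvUpd o (pvD b t)) (acc b)) := by
  induction ts generalizing acc with
  | nil => rfl
  | cons t ts ih =>
    simp only [List.foldl_cons, pvMapStep]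
    exact ih (fun b => pvUpd (acc b) (pvD b t))

-- the option-min fold equals the plain running-min fold once seeded
theorem pvUpdFold (ts : List (Int × Int)) (b : Int × Int) (v : Int) :
    ts.foldl (fun o t => pvUpd o (pvD b t)) (some v)
    = some ((ts.map (pvD b)).foldl min v) := by
  induction ts generalizing v with
  | nil => rfl
  | cons t ts ih =>
    have h : pvUpd (some v) (pvD b t) = some (min v (pvD b t)) := by
      simp only [pvUpd]
      by_cases h : pvD b t < v
      · simp [h, min_eq_right (le_of_lt h)]
      · simp [h, min_eq_left (not_lt.mp h)]
    simp only [List.foldl_cons, h, ih, List.map_cons]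

theorem total_min_manhattan_py_eq_alt (grid : List (List String)) :
    total_min_manhattan_py grid = total_min_manhattan_py_alt grid := by
  unfold total_min_manhattan_py total_min_manhattan_py_alt
  simp only [pvOuterA, pvCellsFilter, List.nil_append]
  set boxes := (PySem.List.enumerate grid 0).flatMap (fun p =>
    ((PySem.List.enumerate p.2 0).filter (fun q => q.2 == "$")).map (fun q => (p.1, q.1))) with hb
  set targets := (PySem.List.enumerate grid 0).flatMap (fun p =>
    ((PySem.List.enumerate p.2 0).filter (fun q => q.2 == "?")).map (fun q => (p.1, q.1))) with ht
  by_cases hguard : boxes = [] ∨ targets = []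
  · simp [hguard]
  · simp only [hguard, if_false]
    push Not at hguard
    obtain ⟨t, ts, hts⟩ := List.exists_cons_of_ne_nil hguard.2
    rw [hts]
    simp only [← pvD_def]
    rw [pvFoldTargets (t :: ts) boxes (fun _ => none)]
    have hpt : (boxes.map (fun b => (t :: ts).foldl (fun o u => pvUpd o (pvD b u)) none))
        = boxes.map (fun b => some ((ts.map (pvD b)).foldl min (pvD b t))) := by
      apply List.map_congr_left
      intro b _
      simp only [List.foldl_cons]
      have h0 : pvUpd none (pvD b t) = some (pvD b t) := rfl
      rw [h0, pvUpdFold]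
    rw [hpt, List.foldl_map]
    simp only [List.map_cons, PySem.List.min?_id_cons, Option.getD_some]

-- ===== VERDICT (by name: the statement is the Claim_ definition above) =====
theorem total_min_manhattan_py_spec : Claim_equal_total_min_manhattan_py := by
  intro grid _
  unfold Spec_total_min_manhattan_py
  exact total_min_manhattan_py_eq_alt grid
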